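-- pv_equiv track=rewrite | github.com/kunjing96/ZSNAS-WRCor | foresight/models/__init__.py | get_combination
-- ===== SOURCE A (Python) =====
-- def get_combination(space, num):
--   combs = []
--   for i in range(num):
--     if i == 0:
--       for func in space:
--         combs.append( [(func, i)] )
--     else:
--       new_combs = []
--       for string in combs:
--         for func in space:
--           xstring = string + [(func, i)]
--           new_combs.append( xstring )
--       combs = new_combs
--   return combs
-- ===== SOURCE B (Python) =====
-- def get_combination(space, num):
--     if num <= 0:
--         return []
--     if num == 1:
--         return [[(f, 0)] for f in space]
--     prev = get_combination(space, num - 1)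
--     return [s + [(f, num - 1)] for s in prev for f in space]
-- ===== Notes on version B (the rewrite author's own statement) =====
-- stated objective: alternative
-- what changed: Replaces A's imperative loop over range(num) that rebuilds new_combs each iteration with a direct recursion on num extending the (num-1)-product by one position via a comprehension.
import Mathlib
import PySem

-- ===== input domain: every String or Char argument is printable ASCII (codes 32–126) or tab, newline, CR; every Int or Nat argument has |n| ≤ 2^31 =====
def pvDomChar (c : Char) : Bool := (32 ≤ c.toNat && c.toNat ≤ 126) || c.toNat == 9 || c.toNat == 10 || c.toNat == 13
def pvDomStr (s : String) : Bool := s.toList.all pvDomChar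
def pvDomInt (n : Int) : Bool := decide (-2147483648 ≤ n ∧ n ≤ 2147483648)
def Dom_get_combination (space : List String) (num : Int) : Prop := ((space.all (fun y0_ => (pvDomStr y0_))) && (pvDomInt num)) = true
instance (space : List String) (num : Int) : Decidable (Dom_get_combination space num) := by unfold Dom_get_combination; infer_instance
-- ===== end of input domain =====

-- ===== PORT A =====
-- literal port of A: fold over range(num), rebuilding new_combs each non-zero iteration
def get_combination (space : List String) (num : Int) : List (List (String × Int)) :=
  (PySem.List.pyRange 0 num 1).foldl (fun combs i =>
    if i = 0 then
      space.foldl (fun combs func => combs ++ [[(func, i)]]) combs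
    else
      combs.foldl (fun new_combs string =>
        space.foldl (fun new_combs func => new_combs ++ [string ++ [(func, i)]]) new_combs) []) []

-- ===== PORT B =====
-- B changes the decomposition: recursion on num, extending the (num-1)-product by one position.
def get_combination_alt (space : List String) (num : Int) : List (List (String × Int)) :=
  if num ≤ 0 then []
  else if num = 1 then space.map (fun f => [(f, 0)])
  else (get_combination_alt space (num - 1)).flatMap (fun s => space.map (fun f => s ++ [(f, num - 1)]))
termination_by num.toNat
decreasing_by omega

-- ===== PRECONDITION & SPEC =====
def Spec_get_combination (space : List String) (num : Int) (out : List (List (String × Int))) : Prop := out = get_combination_alt space num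
instance (space : List String) (num : Int) (out : List (List (String × Int))) : Decidable (Spec_get_combination space num out) := by unfold Spec_get_combination; infer_instance

-- ===== CLAIM (what is proved, stated in full; the proofs are below) =====
def Claim_equal_get_combination : Prop := ∀ (space : List String) (num : Int), Dom_get_combination space num → Spec_get_combination space num (get_combination space num)

-- ===== LEMMAS AND PROOFS =====

theorem flatMap_singleton_map {α β : Type} (f : α → β) (l : List α) :
    l.flatMap (fun x => [f x]) = l.map f := by
  induction l with
  | nil => rfl
  | cons a t ih => simp [ih]

theorem get_combination_nat (space : List String) (n : Nat) :
    get_combination space (n : Int) = get_combination_alt space (n : Int) := by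
  induction n with
  | zero => simp [get_combination, get_combination_alt, PySem.List.pyRange_one_eq_nil]
  | succ n ih =>
    unfold get_combination
    rw [show ((n + 1 : Nat) : Int) = (n : Int) + 1 by push_cast; ring,
        PySem.List.pyRange_one_succ_right (Int.natCast_nonneg n),
        List.foldl_append]
    have hA : (PySem.List.pyRange 0 (n : Int) 1).foldl (fun combs i =>
        if i = 0 then
          space.foldl (fun combs func => combs ++ [[(func, i)]]) combs
        else
          combs.foldl (fun new_combs string =>
            space.foldl (fun new_combs func => new_combs ++ [string ++ [(func, i)]]) new_combs) []) []
        = get_combination space (n : Int) := by rfl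
    rw [hA, ih]
    simp only [List.foldl]
    by_cases hn : n = 0
    · subst hn
      simp only [Nat.cast_zero]
      rw [if_pos trivial,
          show get_combination_alt space (0 : Int) = [] from by rw [get_combination_alt]; simp,
          show get_combination_alt space ((0 : Int) + 1) = space.map (fun f => [(f, 0)]) from by
            rw [get_combination_alt]; norm_num]
      simp [← List.flatMap_def, flatMap_singleton_map]
    · have hn' : ((n : Int)) ≠ 0 := by exact_mod_cast hn
      rw [if_neg hn']
      have hinner : ∀ (acc : List (List (String × Int))) (s : List (String × Int)),
          space.foldl (fun new_combs func => new_combs ++ [s ++ [(func, (n : Int))]]) acc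
          = acc ++ space.map (fun func => s ++ [(func, (n : Int))]) := by
        intro acc s
        simp [← List.flatMap_def, flatMap_singleton_map]
      calc (get_combination_alt space (n : Int)).foldl (fun new_combs string =>
              space.foldl (fun new_combs func => new_combs ++ [string ++ [(func, (n : Int))]]) new_combs) []
          = (get_combination_alt space (n : Int)).foldl (fun new_combs string =>
              new_combs ++ space.map (fun func => string ++ [(func, (n : Int))])) [] := by
            apply PySem.List.foldl_congr_mem
            intro acc s _
            exact hinner acc s
        _ = (get_combination_alt space (n : Int)).flatMap
              (fun string => space.map (fun func => string ++ [(func, (n : Int))])) := by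
            rw [PySem.List.foldl_append_eq_flatMap]; simp
        _ = get_combination_alt space ((n : Int) + 1) := by
            have h1 : ¬ ((n : Int) + 1 ≤ 0) := by omega
            have h2 : ¬ ((n : Int) + 1 = 1) := by omega
            conv_rhs => rw [get_combination_alt]
            rw [if_neg h1, if_neg h2]
            norm_num

-- ===== VERDICT (by name: the statement is the Claim_ definition above) =====
theorem get_combination_spec : Claim_equal_get_combination := by
  intro space num _
  unfold Spec_get_combination
  by_cases h : num ≤ 0
  · rw [show get_combination_alt space num = [] by rw [get_combination_alt]; simp [h]]
    simp [get_combination, PySem.List.pyRange_one_eq_nil h]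
  · have : num = ((num.toNat : Nat) : Int) := by omega
    rw [this]; exact get_combination_nat space num.toNat
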